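-- pv_equiv track=rewrite | github.com/AlejandroSantorum/Termail | termail_util.py | parse_RSA_key
-- ===== SOURCE A (Python) =====
-- def parse_RSA_key(args, start_index):
--     aux = ""
--     i = start_index
--     length = len(args)
--     space_counter = 0
--     linebreak = 0
--     while i < length:
--         aux += args[i]
--         if space_counter<2 and linebreak<8:
--             aux += " "
--             space_counter += 1
--         elif linebreak<8:
--             aux += "\n"
--             linebreak += 1
--         else:
--             aux += " "
--         i += 1
--     return aux
-- ===== SOURCE B (Python) =====
-- def parse_RSA_key(args, start_index):
--     items = [args[i] for i in range(start_index, len(args))]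
--     head, mid, tail = items[:2], items[2:10], items[10:]
--     return (''.join(x + ' ' for x in head)
--             + ''.join(x + '\n' for x in mid)
--             + ''.join(x + ' ' for x in tail))
-- ===== Notes on version B (the rewrite author's own statement) =====
-- stated objective: simpler
-- what changed: Replaces the stateful while-loop with two separator counters by first materialising the indexed items args[start_index..len-1] and then slicing them into three fixed groups (first 2, next 8, rest), each joined with its uniform separator in one pass per group.
import Mathlib
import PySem

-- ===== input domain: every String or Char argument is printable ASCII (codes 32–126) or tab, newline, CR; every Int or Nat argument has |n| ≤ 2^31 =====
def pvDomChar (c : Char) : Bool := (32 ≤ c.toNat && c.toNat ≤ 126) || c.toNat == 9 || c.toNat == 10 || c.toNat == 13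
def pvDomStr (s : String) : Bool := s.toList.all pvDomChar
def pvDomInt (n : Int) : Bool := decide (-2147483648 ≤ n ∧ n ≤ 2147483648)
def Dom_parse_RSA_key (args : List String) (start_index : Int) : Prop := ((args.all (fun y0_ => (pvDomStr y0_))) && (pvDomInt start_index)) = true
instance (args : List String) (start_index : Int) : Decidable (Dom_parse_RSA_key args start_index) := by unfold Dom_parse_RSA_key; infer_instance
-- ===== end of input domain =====

-- B materialises the indexed items args[start_index..len-1] and formats them as three
-- uniformly-separated slices (first 2, next 8, rest) instead of A's counter-driven while loop.

-- ===== PORT A =====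
-- A's while loop; the Nat fuel is (length - i).toNat, which bounds the remaining iterations.
def pA_go (args : List String) (length : Int) : Nat → Int → String → Int → Int → String
  | 0, _, aux, _, _ => aux
  | fuel + 1, i, aux, sc, lb =>
    if i < length then
      match PySem.List.pyGet? args i with
      | none => aux  -- IndexError in Python; outside Pre_
      | some x =>
        if sc < 2 ∧ lb < 8 then pA_go args length fuel (i + 1) (aux ++ x ++ " ") (sc + 1) lb
        else if lb < 8 then pA_go args length fuel (i + 1) (aux ++ x ++ "\n") sc (lb + 1)
        else pA_go args length fuel (i + 1) (aux ++ x ++ " ") sc lb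
    else aux

def parse_RSA_key (args : List String) (start_index : Int) : String :=
  pA_go args (PySem.List.len args) ((PySem.List.len args) - start_index).toNat start_index "" 0 0

-- ===== PORT B =====
-- items = [args[i] for i in range(start_index, len(args))]; the getD "" arm is the
-- IndexError case, excluded by Pre_.
def parse_RSA_key_alt (args : List String) (start_index : Int) : String :=
  let items := (PySem.List.pyRange start_index (PySem.List.len args) 1).map
    (fun i => (PySem.List.pyGet? args i).getD "")
  let head := PySem.List.slice items none (some 2)
  let mid := PySem.List.slice items (some 2) (some 10)
  let tail := PySem.List.slice items (some 10) none
  PySem.Str.join "" (head.map (fun x => x ++ " "))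
    ++ PySem.Str.join "" (mid.map (fun x => x ++ "\n"))
    ++ PySem.Str.join "" (tail.map (fun x => x ++ " "))

-- ===== PRECONDITION & SPEC =====
-- Pre_ excludes exactly the inputs on which Python A raises IndexError
-- (start_index < -len(args)); B raises there too.
def Pre_parse_RSA_key (args : List String) (start_index : Int) : Prop :=
  -(args.length : Int) ≤ start_index
instance (args : List String) (start_index : Int) : Decidable (Pre_parse_RSA_key args start_index) := by
  unfold Pre_parse_RSA_key; infer_instance

def pvWitness_parse_RSA_key : List String × Int := (["a", "b"], 0)

def Spec_parse_RSA_key (args : List String) (start_index : Int) (out : String) : Prop :=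
  out = parse_RSA_key_alt args start_index
instance (args : List String) (start_index : Int) (out : String) : Decidable (Spec_parse_RSA_key args start_index out) := by
  unfold Spec_parse_RSA_key; infer_instance

-- ===== CLAIM =====
def Claim_equal_parse_RSA_key : Prop := ∀ (args : List String) (start_index : Int), Dom_parse_RSA_key args start_index → Pre_parse_RSA_key args start_index → Spec_parse_RSA_key args start_index (parse_RSA_key args start_index)

-- ===== LEMMAS AND PROOFS =====

-- The indexed items args[i], args[i+1], …, args[len-1] (Python indexing).
def itemsFrom (args : List String) (i : Int) : List String :=
  (PySem.List.pyRange i (PySem.List.len args) 1).map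
    (fun j => (PySem.List.pyGet? args j).getD "")

lemma itemsFrom_nil (args : List String) (i : Int) (h : (args.length : Int) ≤ i) :
    itemsFrom args i = [] := by
  unfold itemsFrom
  rw [PySem.List.len_eq, PySem.List.pyRange_one_eq_nil h]
  rfl

lemma itemsFrom_cons (args : List String) (i : Int) (h : i < (args.length : Int)) :
    itemsFrom args i = (PySem.List.pyGet? args i).getD "" :: itemsFrom args (i + 1) := by
  unfold itemsFrom
  rw [PySem.List.len_eq, PySem.List.pyRange_one_cons h, List.map_cons]

-- A's separator automaton, as a function of the remaining items and the two counters.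
def gSpec : List String → Int → Int → String
  | [], _, _ => ""
  | x :: xs, sc, lb =>
    if sc < 2 ∧ lb < 8 then x ++ " " ++ gSpec xs (sc + 1) lb
    else if lb < 8 then x ++ "\n" ++ gSpec xs sc (lb + 1)
    else x ++ " " ++ gSpec xs sc lb

def sj (l : List String) : String := PySem.Str.join "" (l.map (fun x => x ++ " "))
def nj (l : List String) : String := PySem.Str.join "" (l.map (fun x => x ++ "\n"))

lemma jnil : PySem.Str.join "" ([] : List String) = "" := by decide

lemma chars_join_nil_cons (x : List Char) (xs : List (List Char)) :
    PySem.Chars.join [] (x :: xs) = x ++ PySem.Chars.join [] xs := by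
  cases xs with
  | nil => simp [PySem.Chars.join_singleton, PySem.Chars.join_nil]
  | cons y ys => simpa using PySem.Chars.join_cons_cons [] x y ys

lemma jec (x : String) (xs : List String) :
    PySem.Str.join "" (x :: xs) = x ++ PySem.Str.join "" xs := by
  simp [PySem.Str.join, chars_join_nil_cons, String.ofList_append]

lemma gSpec_sp (l : List String) (sc lb : Int) (hsc : 2 ≤ sc) (hlb : 8 ≤ lb) :
    gSpec l sc lb = sj l := by
  induction l with
  | nil => simp [gSpec, sj, jnil]
  | cons x xs ih =>
    have h1 : ¬ (sc < 2 ∧ lb < 8) := by omega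
    have h2 : ¬ lb < 8 := by omega
    simp only [gSpec, if_neg h1, if_neg h2, ih]
    simp [sj, jec, String.append_assoc]

lemma gSpec_nl (l : List String) (sc lb : Int) (hsc : 2 ≤ sc) (hlb : lb ≤ 8) :
    gSpec l sc lb = nj (l.take (8 - lb).toNat) ++ sj (l.drop (8 - lb).toNat) := by
  induction l generalizing lb with
  | nil => simp [gSpec, nj, sj, jnil]
  | cons x xs ih =>
    by_cases hlt : lb < 8
    · have h1 : ¬ (sc < 2 ∧ lb < 8) := by omega
      have hk : (8 - lb).toNat = (8 - (lb + 1)).toNat + 1 := by omega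
      rw [hk]
      simp only [gSpec, if_neg h1, if_pos hlt, List.take_succ_cons, List.drop_succ_cons]
      rw [ih (lb + 1) (by omega)]
      simp [nj, jec, String.append_assoc]
    · have hk : (8 - lb).toNat = 0 := by omega
      rw [hk]
      simp only [List.take_zero, List.drop_zero]
      rw [gSpec_sp (x :: xs) sc lb hsc (by omega)]
      simp [nj, jnil]

lemma gSpec_zero (l : List String) :
    gSpec l 0 0 = sj (l.take 2) ++ (nj ((l.drop 2).take 8) ++ sj ((l.drop 2).drop 8)) := by
  match l with
  | [] => simp [gSpec, sj, nj, jnil]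
  | [x] => norm_num [gSpec, sj, nj, jnil, jec]
  | x :: y :: xs =>
    have e1 : gSpec (x :: y :: xs) 0 0 = x ++ " " ++ (y ++ " " ++ gSpec xs 2 0) := by
      norm_num [gSpec]
    have t2 : List.take 2 (x :: y :: xs) = [x, y] := rfl
    have d2 : List.drop 2 (x :: y :: xs) = xs := rfl
    rw [e1, gSpec_nl xs 2 0 (by omega) (by omega), t2, d2]
    norm_num
    simp [sj, nj, jec, jnil, String.append_assoc]

lemma pA_go_eq_gSpec (args : List String) (fuel : Nat) (i : Int)
    (aux : String) (sc lb : Int) (hlo : -(args.length : Int) ≤ i)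
    (hf : (args.length : Int) - i ≤ (fuel : Int)) :
    pA_go args (args.length : Int) fuel i aux sc lb = aux ++ gSpec (itemsFrom args i) sc lb := by
  induction fuel generalizing i aux sc lb with
  | zero =>
    have h : (args.length : Int) ≤ i := by omega
    rw [itemsFrom_nil args i h]
    simp [pA_go, gSpec]
  | succ f ih =>
    by_cases hi : i < (args.length : Int)
    · cases hx : PySem.List.pyGet? args i with
      | none =>
        exfalso
        rw [PySem.List.pyGet?_eq_none_iff] at hx
        exact hx ⟨hlo, hi⟩
      | some x =>
        have hcons : itemsFrom args i = x :: itemsFrom args (i + 1) := by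
          rw [itemsFrom_cons args i hi, hx]
          rfl
        rw [pA_go]
        simp only [if_pos hi, hx, hcons]
        by_cases h1 : sc < 2 ∧ lb < 8
        · have hg : gSpec (x :: itemsFrom args (i + 1)) sc lb
              = x ++ " " ++ gSpec (itemsFrom args (i + 1)) (sc + 1) lb := by
            rw [gSpec, if_pos h1]
          rw [if_pos h1, ih (i + 1) _ _ _ (by omega) (by omega), hg]
          simp [String.append_assoc]
        · by_cases h2 : lb < 8
          · have hg : gSpec (x :: itemsFrom args (i + 1)) sc lb
                = x ++ "\n" ++ gSpec (itemsFrom args (i + 1)) sc (lb + 1) := by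
              rw [gSpec, if_neg h1, if_pos h2]
            rw [if_neg h1, if_pos h2, ih (i + 1) _ _ _ (by omega) (by omega), hg]
            simp [String.append_assoc]
          · have hg : gSpec (x :: itemsFrom args (i + 1)) sc lb
                = x ++ " " ++ gSpec (itemsFrom args (i + 1)) sc lb := by
              rw [gSpec, if_neg h1, if_neg h2]
            rw [if_neg h1, if_neg h2, ih (i + 1) _ _ _ (by omega) (by omega), hg]
            simp [String.append_assoc]
    · rw [itemsFrom_nil args i (by omega)]
      rw [pA_go]
      simp [if_neg hi, gSpec]

lemma alt_eq (args : List String) (s : Int) :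
    parse_RSA_key_alt args s =
      sj ((itemsFrom args s).take 2) ++ (nj (((itemsFrom args s).drop 2).take 8)
        ++ sj (((itemsFrom args s).drop 2).drop 8)) := by
  have hdd : List.drop 8 (List.drop 2 (itemsFrom args s)) = List.drop 10 (itemsFrom args s) := by
    simp [List.drop_drop]
  have h82 : (10 : Nat) - 2 = 8 := rfl
  unfold parse_RSA_key_alt
  show PySem.Str.join "" ((PySem.List.slice (itemsFrom args s) none (some 2)).map _)
      ++ PySem.Str.join "" ((PySem.List.slice (itemsFrom args s) (some 2) (some 10)).map _)
      ++ PySem.Str.join "" ((PySem.List.slice (itemsFrom args s) (some 10) none).map _) = _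
  simp only [PySem.List.slice_from _ (show (0:Int) ≤ 10 by norm_num),
    PySem.List.slice_to _ (show (0:Int) ≤ 2 by norm_num),
    PySem.List.slice_toNat _ (show (0:Int) ≤ 2 by norm_num) (show (0:Int) ≤ 10 by norm_num),
    hdd, sj, nj, String.append_assoc]
  rfl

-- ===== VERDICT =====
theorem parse_RSA_key_spec : Claim_equal_parse_RSA_key := by
  intro args s _hdom hpre
  show parse_RSA_key args s = parse_RSA_key_alt args s
  unfold parse_RSA_key
  rw [PySem.List.len_eq]
  rw [pA_go_eq_gSpec args ((args.length : Int) - s).toNat s "" 0 0 hpre (by omega)]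
  rw [gSpec_zero, alt_eq args s]
  simp [String.empty_append]
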